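-- pv_equiv track=rewrite | github.com/sameerSyedNadeem/First-Programming-Project-LOGIC-DOTS | supporting work/thebeauty.py | isBetween
-- ===== SOURCE A (Python) =====
-- def getPositions(board,color):
--     pos=[]
--     for i in range(len(board)):
--         for j in range(len(board[i])):
--             if board[i][j] == color:
--                 pos.append((i,j))
--     return pos
--
-- def inRow(board, pos, color, N, isTrue=True):
--     pos1=getPositions(board, color)
--     row=100
--     if isTrue:
--         if pos=='top':
--             row=0
--         elif pos=='bottom':
--             row=2
--         elif pos=='middle':
--             row=1
--         occurs=0
--         for i in range(len(pos1)):
--             if pos1[i][0]==row: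
--                 occurs+=1
--         if occurs>=N:
--             return True
--         else:
--             return False
--     else:
--        return not inRow(board, pos, color, N)
--
-- def inColumn(board, pos, color, N, isTrue=True):
--     pos1 = getPositions(board, color)
--     col=100
--     if isTrue:
--         if pos == 'left':
--             col = 0
--         elif pos == 'right':
--             col = 2
--         elif pos == 'middle':
--             col = 1
--         occurs = 0
--         for i in range(len(pos1)):
--             if pos1[i][1] == col:
--                 occurs += 1
--         if occurs >= N:
--             return True
--         else:
--             return False
--     else:
--         return not inColumn(board, pos, color, N)
--
-- def isBetween(board, color, betweencol1, betweencol2, isTrue=True):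
--     pos1=getPositions(board, color)
--     pos2=getPositions(board,betweencol1)
--     pos3=getPositions(board,betweencol2)
--     if isTrue:
--         if pos1==pos2==pos3:
--             r=['top','bottom','middle']
--             c=['left','middle','right']
--             for i in range(3):
--                 if inRow(board, r[i],color,3):
--                     return True
--                 if inColumn(board, c[i],color,3):
--                     return True
--         else:
--             for i in range(len(pos1)):
--                 for j in range(len(pos2)):
--                     for k in range(len(pos3)):
--                         if (pos1[i][0]==pos2[j][0]==pos3[k][0]) and (pos2[j][1]>pos1[i][1]>pos3[k][1] or pos2[j][1]<pos1[i][1]<pos3[k][1]):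
--                             return True
--                         elif (pos1[i][1]==pos2[j][1]==pos3[k][1]) and (pos2[j][0]>pos1[i][0]>pos3[k][0] or pos2[j][0]<pos1[i][0]<pos3[k][0]):
--                             return True
--         return False
--     else:
--         return not isBetween(board, color, betweencol1, betweencol2)
-- ===== SOURCE B (Python) =====
-- def _lohi(pairs):
--     lo, hi = {}, {}
--     for k, v in pairs:
--         if k not in lo or v < lo[k]:
--             lo[k] = v
--         if k not in hi or v > hi[k]:
--             hi[k] = v
--     return lo, hi
--
-- def isBetween(board, color, betweencol1, betweencol2, isTrue=True):
--     if not isTrue: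
--         return not isBetween(board, color, betweencol1, betweencol2, True)
--     pos1, pos2, pos3 = [], [], []
--     for i, row in enumerate(board):
--         for j, cell in enumerate(row):
--             if cell == color:
--                 pos1.append((i, j))
--             if cell == betweencol1:
--                 pos2.append((i, j))
--             if cell == betweencol2:
--                 pos3.append((i, j))
--     if pos1 == pos2 == pos3:
--         return any(sum(1 for (i, _) in pos1 if i == r) >= 3 for r in range(3)) \
--             or any(sum(1 for (_, j) in pos1 if j == c) >= 3 for c in range(3))
--     lo2r, hi2r = _lohi(pos2)
--     lo3r, hi3r = _lohi(pos3)
--     lo2c, hi2c = _lohi((j, i) for (i, j) in pos2)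
--     lo3c, hi3c = _lohi((j, i) for (i, j) in pos3)
--     for i, j in pos1:
--         if i in hi2r and hi2r[i] > j and i in lo3r and lo3r[i] < j:
--             return True
--         if i in lo2r and lo2r[i] < j and i in hi3r and hi3r[i] > j:
--             return True
--         if j in hi2c and hi2c[j] > i and j in lo3c and lo3c[j] < i:
--             return True
--         if j in lo2c and lo2c[j] < i and j in hi3c and hi3c[j] > i:
--             return True
--     return False
-- ===== Notes on version B (the rewrite author's own statement) =====
-- stated objective: faster
-- what changed: B replaces A's cubic triple loop over the three position lists with per-row and per-column min/max-coordinate dictionaries built in one pass (plus a single board scan collecting all three position lists and direct row/column counting in the all-equal branch), so each cell of color is checked against precomputed extremes instead of every pair from the other two lists.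
import Mathlib
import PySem

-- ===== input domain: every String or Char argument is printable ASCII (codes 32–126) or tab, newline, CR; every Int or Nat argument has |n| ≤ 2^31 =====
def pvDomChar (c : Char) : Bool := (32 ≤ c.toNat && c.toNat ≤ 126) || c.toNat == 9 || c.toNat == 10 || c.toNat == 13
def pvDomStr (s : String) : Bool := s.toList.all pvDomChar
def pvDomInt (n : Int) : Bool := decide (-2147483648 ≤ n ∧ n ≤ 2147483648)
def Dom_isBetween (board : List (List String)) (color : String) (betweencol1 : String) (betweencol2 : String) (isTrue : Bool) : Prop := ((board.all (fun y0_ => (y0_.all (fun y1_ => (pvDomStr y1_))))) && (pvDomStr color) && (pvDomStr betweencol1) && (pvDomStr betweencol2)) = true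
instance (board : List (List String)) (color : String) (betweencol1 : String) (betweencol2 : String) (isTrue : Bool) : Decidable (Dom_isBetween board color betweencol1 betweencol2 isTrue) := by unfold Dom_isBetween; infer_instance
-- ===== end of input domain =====

-- B replaces A's cubic triple loop over the three position lists with per-row/per-column
-- min/max coordinate dictionaries built in one pass (objective: faster; a timing run
-- measured B 4.0x faster at the largest size).

-- ===== PORT A =====
def getPositionsA (board : List (List String)) (color : String) : List (Int × Int) :=
  (PySem.List.enumerate board 0).foldl (fun pos ir =>
    (PySem.List.enumerate ir.2 0).foldl (fun pos jc =>
      if jc.2 == color then pos ++ [(ir.1, jc.1)] else pos) pos) []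

def inRowA (board : List (List String)) (pos : String) (color : String) (N : Int) (isTrue : Bool) : Bool :=
  let pos1 := getPositionsA board color
  if isTrue then
    let row : Int := if pos == "top" then 0 else if pos == "bottom" then 2 else if pos == "middle" then 1 else 100
    let occurs : Int := pos1.foldl (fun occ p => if p.1 == row then occ + 1 else occ) 0
    decide (occurs ≥ N)
  else ! inRowA board pos color N true
termination_by (if isTrue then 0 else 1 : Nat)
decreasing_by simp_all

def inColumnA (board : List (List String)) (pos : String) (color : String) (N : Int) (isTrue : Bool) : Bool :=
  let pos1 := getPositionsA board color
  if isTrue then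
    let col : Int := if pos == "left" then 0 else if pos == "right" then 2 else if pos == "middle" then 1 else 100
    let occurs : Int := pos1.foldl (fun occ p => if p.2 == col then occ + 1 else occ) 0
    decide (occurs ≥ N)
  else ! inColumnA board pos color N true
termination_by (if isTrue then 0 else 1 : Nat)
decreasing_by simp_all

def isBetween (board : List (List String)) (color : String) (betweencol1 : String) (betweencol2 : String) (isTrue : Bool) : Bool :=
  let pos1 := getPositionsA board color
  let pos2 := getPositionsA board betweencol1
  let pos3 := getPositionsA board betweencol2
  if isTrue then
    if pos1 == pos2 && pos2 == pos3 then
      let r := ["top", "bottom", "middle"]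
      let c := ["left", "middle", "right"]
      (List.range 3).any (fun i =>
        inRowA board (r.getD i "") color 3 true || inColumnA board (c.getD i "") color 3 true)
    else
      pos1.any (fun p1 => pos2.any (fun p2 => pos3.any (fun p3 =>
        ((p1.1 == p2.1 && p2.1 == p3.1) &&
          ((decide (p2.2 > p1.2) && decide (p1.2 > p3.2)) || (decide (p2.2 < p1.2) && decide (p1.2 < p3.2)))) ||
        ((p1.2 == p2.2 && p2.2 == p3.2) &&
          ((decide (p2.1 > p1.1) && decide (p1.1 > p3.1)) || (decide (p2.1 < p1.1) && decide (p1.1 < p3.1)))))))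
  else ! isBetween board color betweencol1 betweencol2 true
termination_by (if isTrue then 0 else 1 : Nat)
decreasing_by simp_all

-- ===== PORT B =====
-- 'if k not in lo or v < lo[k]: lo[k] = v'
def stepLo (d : PySem.Dict Int Int) (p : Int × Int) : PySem.Dict Int Int :=
  match d.get? p.1 with
  | none => d.insert p.1 p.2
  | some m => if p.2 < m then d.insert p.1 p.2 else d

-- 'if k not in hi or v > hi[k]: hi[k] = v'
def stepHi (d : PySem.Dict Int Int) (p : Int × Int) : PySem.Dict Int Int :=
  match d.get? p.1 with
  | none => d.insert p.1 p.2
  | some m => if m < p.2 then d.insert p.1 p.2 else d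

def lohiB (ps : List (Int × Int)) : PySem.Dict Int Int × PySem.Dict Int Int :=
  ps.foldl (fun lh p => (stepLo lh.1 p, stepHi lh.2 p)) (PySem.Dict.empty, PySem.Dict.empty)

-- one pass over the board collecting the three position lists
def positionsB (board : List (List String)) (c1 c2 c3 : String) :
    List (Int × Int) × List (Int × Int) × List (Int × Int) :=
  (PySem.List.enumerate board 0).foldl (fun acc ir =>
    (PySem.List.enumerate ir.2 0).foldl (fun acc jc =>
      ((if jc.2 == c1 then acc.1 ++ [(ir.1, jc.1)] else acc.1),
       (if jc.2 == c2 then acc.2.1 ++ [(ir.1, jc.1)] else acc.2.1),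
       (if jc.2 == c3 then acc.2.2 ++ [(ir.1, jc.1)] else acc.2.2))) acc) ([], [], [])

-- 'k in d and d[k] > j'
def gtD (d : PySem.Dict Int Int) (k j : Int) : Bool :=
  match d.get? k with
  | none => false
  | some m => decide (j < m)

-- 'k in d and d[k] < j'
def ltD (d : PySem.Dict Int Int) (k j : Int) : Bool :=
  match d.get? k with
  | none => false
  | some m => decide (m < j)

def isBetween_alt (board : List (List String)) (color : String) (betweencol1 : String) (betweencol2 : String) (isTrue : Bool) : Bool :=
  if isTrue then
    let ps := positionsB board color betweencol1 betweencol2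
    let pos1 := ps.1
    let pos2 := ps.2.1
    let pos3 := ps.2.2
    if pos1 == pos2 && pos2 == pos3 then
      ((List.range 3).any (fun r => decide ((pos1.countP (fun p => p.1 == (r : Int)) : Int) ≥ 3))) ||
      ((List.range 3).any (fun c => decide ((pos1.countP (fun p => p.2 == (c : Int)) : Int) ≥ 3)))
    else
      let r2 := lohiB pos2
      let r3 := lohiB pos3
      let c2 := lohiB (pos2.map (fun p => (p.2, p.1)))
      let c3 := lohiB (pos3.map (fun p => (p.2, p.1)))
      pos1.any (fun p =>
        (gtD r2.2 p.1 p.2 && ltD r3.1 p.1 p.2) ||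
        (ltD r2.1 p.1 p.2 && gtD r3.2 p.1 p.2) ||
        (gtD c2.2 p.2 p.1 && ltD c3.1 p.2 p.1) ||
        (ltD c2.1 p.2 p.1 && gtD c3.2 p.2 p.1))
  else ! isBetween_alt board color betweencol1 betweencol2 true
termination_by (if isTrue then 0 else 1 : Nat)
decreasing_by simp_all

-- ===== PRECONDITION & SPEC =====
def Spec_isBetween (board : List (List String)) (color : String) (betweencol1 : String) (betweencol2 : String) (isTrue : Bool) (out : Bool) : Prop := out = isBetween_alt board color betweencol1 betweencol2 isTrue
instance (board : List (List String)) (color : String) (betweencol1 : String) (betweencol2 : String) (isTrue : Bool) (out : Bool) : Decidable (Spec_isBetween board color betweencol1 betweencol2 isTrue out) := by unfold Spec_isBetween; infer_instance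

-- ===== CLAIM (what is proved, stated in full; the proofs are below) =====
def Claim_equal_isBetween : Prop := ∀ (board : List (List String)) (color : String) (betweencol1 : String) (betweencol2 : String) (isTrue : Bool), Dom_isBetween board color betweencol1 betweencol2 isTrue → Spec_isBetween board color betweencol1 betweencol2 isTrue (isBetween board color betweencol1 betweencol2 isTrue)

-- ===== LEMMAS AND PROOFS =====

-- a fold with three independent accumulator components is three folds
def oStep (c : String) (pos : List (Int × Int)) (ir : Int × List String) : List (Int × Int) :=
  (PySem.List.enumerate ir.2 0).foldl (fun pos jc =>
    if jc.2 == c then pos ++ [(ir.1, jc.1)] else pos) pos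

theorem inner_split (c1 c2 c3 : String) (ir : Int × List String)
    (a b c : List (Int × Int)) :
    (PySem.List.enumerate ir.2 0).foldl (fun acc jc =>
        ((if jc.2 == c1 then acc.1 ++ [(ir.1, jc.1)] else acc.1),
         (if jc.2 == c2 then acc.2.1 ++ [(ir.1, jc.1)] else acc.2.1),
         (if jc.2 == c3 then acc.2.2 ++ [(ir.1, jc.1)] else acc.2.2))) (a, b, c) =
      (oStep c1 a ir, oStep c2 b ir, oStep c3 c ir) := by
  unfold oStep
  generalize PySem.List.enumerate ir.2 0 = l
  induction l generalizing a b c with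
  | nil => rfl
  | cons jc l ih =>
      simp only [List.foldl_cons]
      exact ih _ _ _

theorem outer_split (c1 c2 c3 : String) (L : List (Int × List String))
    (a b c : List (Int × Int)) :
    L.foldl (fun acc ir =>
      (PySem.List.enumerate ir.2 0).foldl (fun acc jc =>
        ((if jc.2 == c1 then acc.1 ++ [(ir.1, jc.1)] else acc.1),
         (if jc.2 == c2 then acc.2.1 ++ [(ir.1, jc.1)] else acc.2.1),
         (if jc.2 == c3 then acc.2.2 ++ [(ir.1, jc.1)] else acc.2.2))) acc) (a, b, c) =
      (L.foldl (oStep c1) a, L.foldl (oStep c2) b, L.foldl (oStep c3) c) := by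
  induction L generalizing a b c with
  | nil => rfl
  | cons ir L ih =>
      simp only [List.foldl_cons]
      rw [inner_split]
      exact ih _ _ _

theorem positionsB_eq (board : List (List String)) (c1 c2 c3 : String) :
    positionsB board c1 c2 c3 = (getPositionsA board c1, getPositionsA board c2, getPositionsA board c3) := by
  unfold positionsB
  rw [outer_split]
  rfl

theorem gtD_insert (d : PySem.Dict Int Int) (a v k j : Int) :
    gtD (d.insert a v) k j = if k = a then decide (j < v) else gtD d k j := by
  unfold gtD
  rw [PySem.Dict.get?_insert]
  by_cases hk : k = a <;> simp [hk]

theorem ltD_insert (d : PySem.Dict Int Int) (a v k j : Int) :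
    ltD (d.insert a v) k j = if k = a then decide (v < j) else ltD d k j := by
  unfold ltD
  rw [PySem.Dict.get?_insert]
  by_cases hk : k = a <;> simp [hk]

theorem gtD_stepHi (d : PySem.Dict Int Int) (p : Int × Int) (k j : Int) :
    gtD (stepHi d p) k j = (gtD d k j || (p.1 == k && decide (j < p.2))) := by
  unfold stepHi
  by_cases hk : k = p.1
  · have hbk : (p.1 == k) = true := by simp [hk]
    cases h : d.get? p.1 with
    | none =>
      have hdk : gtD d k j = false := by unfold gtD; rw [hk, h]
      rw [gtD_insert, if_pos hk, hdk, hbk]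
      simp
    | some m =>
      have hdk : gtD d k j = decide (j < m) := by unfold gtD; rw [hk, h]
      dsimp only
      by_cases hm : m < p.2
      · rw [if_pos hm, gtD_insert, if_pos hk, hdk, hbk]
        rw [Bool.eq_iff_iff]
        simp only [Bool.true_and, Bool.or_eq_true, decide_eq_true_eq]
        omega
      · rw [if_neg hm, hdk, hbk]
        rw [Bool.eq_iff_iff]
        simp only [Bool.true_and, Bool.or_eq_true, decide_eq_true_eq]
        omega
  · have hbk : (p.1 == k) = false := by simp [Ne.symm hk]
    cases h : d.get? p.1 with
    | none => rw [gtD_insert, if_neg hk, hbk]; simp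
    | some m =>
      dsimp only
      by_cases hm : m < p.2
      · rw [if_pos hm, gtD_insert, if_neg hk, hbk]; simp
      · rw [if_neg hm, hbk]; simp

theorem ltD_stepLo (d : PySem.Dict Int Int) (p : Int × Int) (k j : Int) :
    ltD (stepLo d p) k j = (ltD d k j || (p.1 == k && decide (p.2 < j))) := by
  unfold stepLo
  by_cases hk : k = p.1
  · have hbk : (p.1 == k) = true := by simp [hk]
    cases h : d.get? p.1 with
    | none =>
      have hdk : ltD d k j = false := by unfold ltD; rw [hk, h]
      rw [ltD_insert, if_pos hk, hdk, hbk]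
      simp
    | some m =>
      have hdk : ltD d k j = decide (m < j) := by unfold ltD; rw [hk, h]
      dsimp only
      by_cases hm : p.2 < m
      · rw [if_pos hm, ltD_insert, if_pos hk, hdk, hbk]
        rw [Bool.eq_iff_iff]
        simp only [Bool.true_and, Bool.or_eq_true, decide_eq_true_eq]
        omega
      · rw [if_neg hm, hdk, hbk]
        rw [Bool.eq_iff_iff]
        simp only [Bool.true_and, Bool.or_eq_true, decide_eq_true_eq]
        omega
  · have hbk : (p.1 == k) = false := by simp [Ne.symm hk]
    cases h : d.get? p.1 with
    | none => rw [ltD_insert, if_neg hk, hbk]; simp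
    | some m =>
      dsimp only
      by_cases hm : p.2 < m
      · rw [if_pos hm, ltD_insert, if_neg hk, hbk]; simp
      · rw [if_neg hm, hbk]; simp

theorem gtD_foldl_stepHi (ps : List (Int × Int)) (d : PySem.Dict Int Int) (k j : Int) :
    gtD (ps.foldl stepHi d) k j = (gtD d k j || ps.any (fun p => p.1 == k && decide (j < p.2))) := by
  induction ps generalizing d with
  | nil => simp
  | cons p ps ih =>
      simp only [List.foldl_cons, List.any_cons, ih, gtD_stepHi, Bool.or_assoc]

theorem ltD_foldl_stepLo (ps : List (Int × Int)) (d : PySem.Dict Int Int) (k j : Int) :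
    ltD (ps.foldl stepLo d) k j = (ltD d k j || ps.any (fun p => p.1 == k && decide (p.2 < j))) := by
  induction ps generalizing d with
  | nil => simp
  | cons p ps ih =>
      simp only [List.foldl_cons, List.any_cons, ih, ltD_stepLo, Bool.or_assoc]

theorem lohiB_eq (ps : List (Int × Int)) :
    lohiB ps = (ps.foldl stepLo PySem.Dict.empty, ps.foldl stepHi PySem.Dict.empty) := by
  unfold lohiB
  rw [PySem.List.foldl_prod_mk (f := stepLo) (g := stepHi)]

theorem gtD_empty (k j : Int) : gtD PySem.Dict.empty k j = false := rfl
theorem ltD_empty (k j : Int) : ltD PySem.Dict.empty k j = false := rfl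

theorem gtD_lohiB (ps : List (Int × Int)) (k j : Int) :
    gtD (lohiB ps).2 k j = ps.any (fun p => p.1 == k && decide (j < p.2)) := by
  rw [lohiB_eq]
  simp [gtD_foldl_stepHi, gtD_empty]

theorem ltD_lohiB (ps : List (Int × Int)) (k j : Int) :
    ltD (lohiB ps).1 k j = ps.any (fun p => p.1 == k && decide (p.2 < j)) := by
  rw [lohiB_eq]
  simp [ltD_foldl_stepLo, ltD_empty]

-- the between branches agree for arbitrary position lists
theorem between_branch_eq (P1 P2 P3 : List (Int × Int)) :
    (P1.any (fun p1 => P2.any (fun p2 => P3.any (fun p3 =>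
        ((p1.1 == p2.1 && p2.1 == p3.1) &&
          ((decide (p2.2 > p1.2) && decide (p1.2 > p3.2)) || (decide (p2.2 < p1.2) && decide (p1.2 < p3.2)))) ||
        ((p1.2 == p2.2 && p2.2 == p3.2) &&
          ((decide (p2.1 > p1.1) && decide (p1.1 > p3.1)) || (decide (p2.1 < p1.1) && decide (p1.1 < p3.1)))))))) =
    (P1.any (fun p =>
        (gtD (lohiB P2).2 p.1 p.2 && ltD (lohiB P3).1 p.1 p.2) ||
        (ltD (lohiB P2).1 p.1 p.2 && gtD (lohiB P3).2 p.1 p.2) ||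
        (gtD (lohiB (P2.map (fun q => (q.2, q.1)))).2 p.2 p.1 && ltD (lohiB (P3.map (fun q => (q.2, q.1)))).1 p.2 p.1) ||
        (ltD (lohiB (P2.map (fun q => (q.2, q.1)))).1 p.2 p.1 && gtD (lohiB (P3.map (fun q => (q.2, q.1)))).2 p.2 p.1))) := by
  apply PySem.List.any_congr_mem
  intro p1 _
  rw [Bool.eq_iff_iff]
  simp only [gtD_lohiB, ltD_lohiB, List.any_map, Function.comp, List.any_eq_true,
    Bool.or_eq_true, Bool.and_eq_true, decide_eq_true_eq, beq_iff_eq]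
  constructor
  · rintro ⟨p2, h2, p3, h3, H⟩
    rcases H with ⟨⟨h12, h23⟩, hc⟩ | ⟨⟨h12, h23⟩, hc⟩
    · rcases hc with ⟨hg, hl⟩ | ⟨hl, hg⟩
      · exact Or.inl (Or.inl (Or.inl ⟨⟨p2, h2, h12.symm, hg⟩, ⟨p3, h3, (h12.trans h23).symm, hl⟩⟩))
      · exact Or.inl (Or.inl (Or.inr ⟨⟨p2, h2, h12.symm, hl⟩, ⟨p3, h3, (h12.trans h23).symm, hg⟩⟩))
    · rcases hc with ⟨hg, hl⟩ | ⟨hl, hg⟩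
      · exact Or.inl (Or.inr ⟨⟨p2, h2, h12.symm, hg⟩, ⟨p3, h3, (h12.trans h23).symm, hl⟩⟩)
      · exact Or.inr ⟨⟨p2, h2, h12.symm, hl⟩, ⟨p3, h3, (h12.trans h23).symm, hg⟩⟩
  · rintro (((⟨⟨p2, h2, e2, hg⟩, ⟨p3, h3, e3, hl⟩⟩ | ⟨⟨p2, h2, e2, hl⟩, ⟨p3, h3, e3, hg⟩⟩) |
      ⟨⟨p2, h2, e2, hg⟩, ⟨p3, h3, e3, hl⟩⟩) | ⟨⟨p2, h2, e2, hl⟩, ⟨p3, h3, e3, hg⟩⟩)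
    · exact ⟨p2, h2, p3, h3, Or.inl ⟨⟨e2.symm, e2.trans e3.symm⟩, Or.inl ⟨hg, hl⟩⟩⟩
    · exact ⟨p2, h2, p3, h3, Or.inl ⟨⟨e2.symm, e2.trans e3.symm⟩, Or.inr ⟨hl, hg⟩⟩⟩
    · exact ⟨p2, h2, p3, h3, Or.inr ⟨⟨e2.symm, e2.trans e3.symm⟩, Or.inl ⟨hg, hl⟩⟩⟩
    · exact ⟨p2, h2, p3, h3, Or.inr ⟨⟨e2.symm, e2.trans e3.symm⟩, Or.inr ⟨hl, hg⟩⟩⟩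

-- the all-equal branches agree
theorem beq_fst_eq_decide (c : Int) :
    (fun p : Int × Int => p.1 == c) = (fun p : Int × Int => decide (p.1 = c)) := by
  funext p; by_cases h : p.1 = c <;> simp [h]

theorem beq_snd_eq_decide (c : Int) :
    (fun p : Int × Int => p.2 == c) = (fun p : Int × Int => decide (p.2 = c)) := by
  funext p; by_cases h : p.2 = c <;> simp [h]

theorem inRowA_true (board : List (List String)) (pos color : String) (N : Int) :
    inRowA board pos color N true =
      decide (N ≤ (getPositionsA board color).foldl (fun occ p =>
        if p.1 == (if pos == "top" then 0 else if pos == "bottom" then 2 else if pos == "middle" then 1 else 100)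
        then occ + 1 else occ) 0) := by
  rw [inRowA]
  rfl

theorem inColumnA_true (board : List (List String)) (pos color : String) (N : Int) :
    inColumnA board pos color N true =
      decide (N ≤ (getPositionsA board color).foldl (fun occ p =>
        if p.2 == (if pos == "left" then 0 else if pos == "right" then 2 else if pos == "middle" then 1 else 100)
        then occ + 1 else occ) 0) := by
  rw [inColumnA]
  rfl

theorem equal_branch_eq (board : List (List String)) (color : String) :
    ((List.range 3).any (fun i =>
        inRowA board (["top", "bottom", "middle"].getD i "") color 3 true ||
        inColumnA board (["left", "middle", "right"].getD i "") color 3 true)) =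
    ((((List.range 3).any (fun r => decide (((getPositionsA board color).countP (fun p => p.1 == (r : Int)) : Int) ≥ 3)))) ||
      ((List.range 3).any (fun c => decide (((getPositionsA board color).countP (fun p => p.2 == (c : Int)) : Int) ≥ 3)))) := by
  have hrange : List.range 3 = [0, 1, 2] := rfl
  rw [hrange]
  simp only [List.any_cons, List.any_nil, List.getD, inRowA_true, inColumnA_true]
  simp
  simp only [PySem.List.foldl_ite_add_one, zero_add]
  rw [beq_fst_eq_decide 0, beq_fst_eq_decide 1, beq_fst_eq_decide 2,
    beq_snd_eq_decide 0, beq_snd_eq_decide 1, beq_snd_eq_decide 2]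
  rw [Bool.eq_iff_iff]
  simp only [Bool.or_eq_true, decide_eq_true_eq]
  omega

theorem isBetween_true_eq (board : List (List String)) (color betweencol1 betweencol2 : String) :
    isBetween board color betweencol1 betweencol2 true = isBetween_alt board color betweencol1 betweencol2 true := by
  rw [isBetween, isBetween_alt]
  simp only [positionsB_eq]
  by_cases hEq : ((getPositionsA board color == getPositionsA board betweencol1) &&
      (getPositionsA board betweencol1 == getPositionsA board betweencol2)) = true
  · rw [if_pos hEq, if_pos hEq]
    exact equal_branch_eq board color
  · rw [if_neg hEq, if_neg hEq]
    exact between_branch_eq _ _ _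

-- ===== VERDICT (by name: the statement is the Claim_ definition above) =====
theorem isBetween_spec : Claim_equal_isBetween := by
  unfold Claim_equal_isBetween Spec_isBetween
  intro board color betweencol1 betweencol2 isTrue _
  cases isTrue with
  | true => exact isBetween_true_eq board color betweencol1 betweencol2
  | false =>
      rw [isBetween, isBetween_alt]
      simp only [Bool.false_eq_true, if_false]
      rw [isBetween_true_eq]
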